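-- pv_equiv track=rewrite | github.com/sebtsh/Top-k-Ranking-Bayesian-Optimization | acquisitions/rank_pes.py | gen_separator_at
-- ===== SOURCE A (Python) =====
-- def gen_separator_at(idx, num_choice):
--     # idx in [0, 2**(num_choice-1)]
--     j = 0
--     last_digit = -1
--     seperator = []
--
--     while idx > 0:
--
--         if idx % 2 != last_digit:
--             last_digit = idx % 2
--             seperator.append(j)
--
--         idx = int(idx / 2)
--
--         j+= 1
--
--     if j < num_choice:
--         seperator.append(j)
--
--     seperator.append(num_choice)
--     return seperator
-- ===== SOURCE B (Python) =====
-- def gen_separator_at(idx, num_choice):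
--     # Render idx's binary digits once (LSB first) and list the bit-transition
--     # indices with a comprehension instead of a destructive div-by-2 loop.
--     bits = format(idx, 'b')[::-1] if idx > 0 else ''
--     seperator = ([0] if bits else []) + \
--         [p + 1 for p in range(len(bits) - 1) if bits[p] != bits[p + 1]]
--     if len(bits) < num_choice:
--         seperator.append(len(bits))
--     seperator.append(num_choice)
--     return seperator
-- ===== Notes on version B (the rewrite author's own statement) =====
-- stated objective: idiomatic
-- what changed: Replaces the destructive divide-by-2 loop with last_digit/j mutable state by rendering idx's binary digits once (format) and listing the bit-transition indices with a comprehension.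
import Mathlib
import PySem

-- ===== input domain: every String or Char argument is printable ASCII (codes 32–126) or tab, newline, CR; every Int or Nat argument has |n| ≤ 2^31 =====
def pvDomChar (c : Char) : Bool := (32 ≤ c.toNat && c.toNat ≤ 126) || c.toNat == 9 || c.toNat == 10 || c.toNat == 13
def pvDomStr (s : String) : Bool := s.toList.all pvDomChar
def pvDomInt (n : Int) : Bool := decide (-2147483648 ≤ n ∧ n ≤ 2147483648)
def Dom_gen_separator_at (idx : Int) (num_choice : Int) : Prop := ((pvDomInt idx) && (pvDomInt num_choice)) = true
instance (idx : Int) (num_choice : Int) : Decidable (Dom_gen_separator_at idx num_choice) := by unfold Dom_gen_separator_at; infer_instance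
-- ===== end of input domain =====

-- B renders idx's binary digits once and lists the bit-transition indices with a
-- comprehension, instead of A's destructive divide-by-2 loop with last_digit state.

-- ===== PORT A =====
-- The while loop runs only while idx > 0, so it is transliterated as recursion on
-- idx.toNat; for 0 < idx ≤ 2^31 Python's `int(idx / 2)` (exact float division,
-- truncated) is exactly Nat division by 2, and `idx % 2` is Nat mod 2.
def genSepAux (idx : Nat) (j : Int) (last_digit : Int) (seperator : List Int) :
    Int × List Int :=
  if h : idx > 0 then
    if ((idx % 2 : Nat) : Int) ≠ last_digit then
      genSepAux (idx / 2) (j + 1) ((idx % 2 : Nat) : Int) (seperator ++ [j])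
    else
      genSepAux (idx / 2) (j + 1) last_digit seperator
  else (j, seperator)
  decreasing_by all_goals exact Nat.div_lt_self h (by norm_num)

def gen_separator_at (idx : Int) (num_choice : Int) : List Int :=
  let r := genSepAux idx.toNat 0 (-1) []
  let seperator := if r.1 < num_choice then r.2 ++ [r.1] else r.2
  seperator ++ [num_choice]

-- ===== PORT B =====
-- binLSB n renders `format(n, 'b')[::-1]` as its list of binary digits, LSB first.
def binLSB : Nat → List Int
  | 0 => []
  | n + 1 => (((n + 1) % 2 : Nat) : Int) :: binLSB ((n + 1) / 2)
  decreasing_by exact Nat.div_lt_self (by omega) (by norm_num)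

def gen_separator_at_alt (idx : Int) (num_choice : Int) : List Int :=
  let bits := if idx > 0 then binLSB idx.toNat else []
  let seperator :=
    (if bits = [] then [] else [(0 : Int)]) ++
      (List.range (bits.length - 1)).filterMap
        (fun (p : Nat) => if bits[p]? ≠ bits[p + 1]? then some ((p : Int) + 1) else none)
  let seperator := if (bits.length : Int) < num_choice
    then seperator ++ [(bits.length : Int)] else seperator
  seperator ++ [num_choice]

-- ===== PRECONDITION & SPEC =====
def Spec_gen_separator_at (idx : Int) (num_choice : Int) (out : List Int) : Prop := out = gen_separator_at_alt idx num_choice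
instance (idx : Int) (num_choice : Int) (out : List Int) : Decidable (Spec_gen_separator_at idx num_choice out) := by unfold Spec_gen_separator_at; infer_instance

-- ===== CLAIM (what is proved, stated in full; the proofs are below) =====
def Claim_equal_gen_separator_at : Prop := ∀ (idx : Int) (num_choice : Int), Dom_gen_separator_at idx num_choice → Spec_gen_separator_at idx num_choice (gen_separator_at idx num_choice)

-- ===== LEMMAS AND PROOFS =====

-- transition positions of a digit list given the previous digit `last`
def transPos (last : Int) : List Int → List Int
  | [] => []
  | b :: rest => (if b ≠ last then [(0 : Int)] else []) ++ (transPos b rest).map (· + 1)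

-- adjacent-difference positions of a digit list
def dpos : List Int → List Int
  | a :: b :: rest => (if a ≠ b then [(0 : Int)] else []) ++ (dpos (b :: rest)).map (· + 1)
  | _ => []

theorem transPos_eq_dpos (rest : List Int) : ∀ b : Int, transPos b rest = dpos (b :: rest) := by
  induction rest with
  | nil => intro b; simp [transPos, dpos]
  | cons c rest' IH =>
    intro b
    simp only [transPos, dpos, IH c]
    congr 1
    simp [ne_comm]

theorem shift_fun (x : Int) (bits : List Int) :
    (fun (p : Nat) => if (x :: bits)[p]? ≠ (x :: bits)[p + 1]? then some ((p : Int) + 1) else none)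
        ∘ Nat.succ
      = fun (p : Nat) =>
        ((fun (q : Nat) => if bits[q]? ≠ bits[q + 1]? then some ((q : Int) + 1) else none) p).map
          (· + 1) := by
  funext p
  simp only [Function.comp_apply, List.getElem?_cons_succ]
  split <;> simp

theorem filterMap_eq_dpos (bits : List Int) :
    (List.range (bits.length - 1)).filterMap
        (fun (p : Nat) => if bits[p]? ≠ bits[p + 1]? then some ((p : Int) + 1) else none)
      = (dpos bits).map (· + 1) := by
  match bits with
  | [] => simp [dpos]
  | [a] => simp [dpos]
  | a :: b :: rest =>
    have IH := filterMap_eq_dpos (b :: rest)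
    simp only [List.length_cons, Nat.add_sub_cancel] at IH ⊢
    rw [List.range_succ_eq_map, List.filterMap_cons, List.filterMap_map, shift_fun,
      ← List.map_filterMap, IH]
    by_cases hab : a = b
    · subst hab; simp [dpos, List.map_map, Function.comp_def]
    · simp [dpos, hab, List.map_map, Function.comp_def]

theorem genSepAux_eq (n : Nat) : ∀ (j last : Int) (sep : List Int),
    genSepAux n j last sep =
      (j + ((binLSB n).length : Int), sep ++ (transPos last (binLSB n)).map (· + j)) := by
  induction n using Nat.strong_induction_on with
  | _ n IH =>
    intro j last sep
    match n with
    | 0 => simp [genSepAux, binLSB, transPos]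
    | m + 1 =>
      have h2 : (m + 1) / 2 < m + 1 := Nat.div_lt_self (by omega) (by norm_num)
      rw [genSepAux]
      simp only [show m + 1 > 0 from by omega, dite_true]
      by_cases hne : (((m + 1) % 2 : Nat) : Int) ≠ last
      · rw [if_pos hne, IH _ h2]
        rw [show binLSB (m + 1) = (((m + 1) % 2 : Nat) : Int) :: binLSB ((m + 1) / 2) from by
          rw [binLSB]]
        simp only [transPos, List.length_cons, Prod.mk.injEq, ne_eq, hne, not_false_eq_true,
          List.map_append, List.map_map]
        refine ⟨by push_cast; ring, ?_⟩
        simp [Function.comp_def, add_assoc, add_comm (1 : Int) j]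
      · rw [if_neg hne, IH _ h2]
        rw [not_not] at hne
        rw [show binLSB (m + 1) = (((m + 1) % 2 : Nat) : Int) :: binLSB ((m + 1) / 2) from by
          rw [binLSB]]
        rw [show transPos last ((((m + 1) % 2 : Nat) : Int) :: binLSB ((m + 1) / 2))
            = (transPos (((m + 1) % 2 : Nat) : Int) (binLSB ((m + 1) / 2))).map (· + 1) from by
          rw [transPos, if_neg (by simp [hne]), List.nil_append]]
        rw [hne]
        simp only [Prod.mk.injEq, List.length_cons, List.map_map]
        refine ⟨by push_cast; ring, ?_⟩
        simp [Function.comp_def, add_assoc, add_comm (1 : Int) j]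

-- ===== VERDICT (by name: the statement is the Claim_ definition above) =====
theorem gen_separator_at_spec : Claim_equal_gen_separator_at := by
  intro idx num_choice _hD
  show gen_separator_at idx num_choice = gen_separator_at_alt idx num_choice
  by_cases hpos : idx > 0
  · have hn : idx.toNat > 0 := by omega
    obtain ⟨m, hm⟩ : ∃ m, idx.toNat = m + 1 := ⟨idx.toNat - 1, by omega⟩
    simp only [gen_separator_at, gen_separator_at_alt, if_pos hpos]
    rw [genSepAux_eq, filterMap_eq_dpos, hm]
    rw [show binLSB (m + 1) = (((m + 1) % 2 : Nat) : Int) :: binLSB ((m + 1) / 2) from by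
      rw [binLSB]]
    have hhd : (((m + 1) % 2 : Nat) : Int) ≠ -1 := by omega
    simp only [transPos, ne_eq, hhd, not_false_eq_true, transPos_eq_dpos, List.cons_ne_nil]
    simp [Function.comp_def]
  · simp only [gen_separator_at, gen_separator_at_alt, if_neg hpos]
    rw [show idx.toNat = 0 from by omega]
    simp [genSepAux]
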